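-- pv_equiv track=rewrite | github.com/superpowers04/haxe-sublime-bundle | features/haxe_helper.py | parse_sig
-- ===== SOURCE A (Python) =====
-- def parse_sig(sig):
--     params = []
--     spl = sig.split(" -> ")
--     pars = 0;
--     currentType = [];
--
--     for t in spl :
--         currentType.append( t )
--         for ch in t:
--             if ch in "({<" :
--                 pars += 1
--             if ch in ")}>" :
--                 pars -= 1
--
--         if pars == 0 :
--             params.append(
--                 " -> ".join(currentType).replace('(', '').replace(')', ''))
--             currentType = []
--
--     ret = 'haxe-sublime-bundle-bug'
--     if params:
--         ret = params.pop()
--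
--     if not params:
--         params = None
--     elif len(params) == 1 and params[0] == "Void" :
--         params = []
--
--     return params, ret
-- ===== SOURCE B (Python) =====
-- def parse_sig(sig):
--     # single left-to-right character scan with a depth counter; cut at top-level " -> "
--     segs = []
--     buf = []
--     depth = 0
--     i = 0
--     n = len(sig)
--     while i < n:
--         if sig.startswith(" -> ", i):
--             if depth == 0:
--                 segs.append("".join(buf))
--                 buf = []
--             else:
--                 buf.append(" -> ")
--             i += 4
--             continue
--         ch = sig[i]
--         if ch in "({<":
--             depth += 1
--         if ch in ")}>":
--             depth -= 1
--         buf.append(ch)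
--         i += 1
--     if depth == 0:
--         segs.append("".join(buf))
--     segs = [s.replace('(', '').replace(')', '') for s in segs]
--     if not segs:
--         return None, 'haxe-sublime-bundle-bug'
--     ret = segs.pop()
--     if not segs:
--         return None, ret
--     if len(segs) == 1 and segs[0] == "Void":
--         return [], ret
--     return segs, ret
-- ===== Notes on version B (the rewrite author's own statement) =====
-- stated objective: alternative
-- what changed: A splits the string on " -> " and then re-joins chunks in a second loop while a paren-depth counter balances; B makes one left-to-right character scan that consumes " -> " atomically and cuts the running buffer whenever the separator occurs at depth 0, emitting the final buffer only when the depth is balanced.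
import Mathlib
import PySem

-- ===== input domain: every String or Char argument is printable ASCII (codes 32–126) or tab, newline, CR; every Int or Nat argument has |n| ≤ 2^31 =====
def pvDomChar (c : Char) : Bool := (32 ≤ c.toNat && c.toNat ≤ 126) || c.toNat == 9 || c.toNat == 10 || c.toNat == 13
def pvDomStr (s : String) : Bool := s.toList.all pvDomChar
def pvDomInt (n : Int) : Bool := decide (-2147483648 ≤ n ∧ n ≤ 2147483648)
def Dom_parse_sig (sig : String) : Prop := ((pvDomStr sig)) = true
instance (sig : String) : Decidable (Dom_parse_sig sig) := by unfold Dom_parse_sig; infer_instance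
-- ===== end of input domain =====

-- B replaces A's split-then-regroup (split on " -> ", then re-join chunks while a depth
-- counter balances) by a single left-to-right scan that cuts the buffer at top-level " -> ".

-- shared small helpers (literal pieces of both Pythons)
def sepL : List Char := [' ', '-', '>', ' ']
def bugChars : List Char := "haxe-sublime-bundle-bug".toList
def voidChars : List Char := ['V', 'o', 'i', 'd']
-- one character's effect on the paren counter: the two successive 'if's of the Pythons
def step (p : Int) (ch : Char) : Int :=
  let p := if ['(', '{', '<'].contains ch then p + 1 else p
  if [')', '}', '>'].contains ch then p - 1 else p
-- .replace('(', '').replace(')', '')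
def stripP (s : List Char) : List Char :=
  PySem.Chars.replace (PySem.Chars.replace s ['('] []) [')'] []

-- ===== PORT A =====
-- tail of A: ret = 'haxe-sublime-bundle-bug'; if params: ret = params.pop(); None / Void cases
def apost (params : List (List Char)) : Option (List String) × String :=
  let ret := if params.isEmpty then bugChars else (params.getLast?).getD []
  let params := if params.isEmpty then params else params.dropLast
  if params.isEmpty then (none, String.ofList ret)
  else if params.length == 1 && params.headD [] == voidChars then (some [], String.ofList ret)
  else (some (params.map String.ofList), String.ofList ret)

def parse_sig (sig : String) : Option (List String) × String :=
  let spl := PySem.Chars.splitOn sig.toList sepL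
  let st := spl.foldl (fun (st : List (List Char) × Int × List (List Char)) t =>
      let currentType := st.2.2 ++ [t]
      let pars := t.foldl step st.2.1
      if pars == 0 then
        (st.1 ++ [stripP (PySem.Chars.join sepL currentType)], pars, ([] : List (List Char)))
      else (st.1, pars, currentType))
    (([] : List (List Char)), (0 : Int), ([] : List (List Char)))
  apost st.1

-- ===== PORT B =====
-- Source B's while loop: consume " -> " atomically; cut when depth == 0, else keep it in buf
def scanB (cs : List Char) (depth : Int) (buf : List Char) (segs : List (List Char)) :
    List (List Char) :=
  match cs with
  | [] => if depth == 0 then segs ++ [buf] else segs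
  | c :: rest =>
    if sepL.isPrefixOf (c :: rest) then
      if depth == 0 then scanB ((c :: rest).drop 4) depth [] (segs ++ [buf])
      else scanB ((c :: rest).drop 4) depth (buf ++ sepL) segs
    else scanB rest (step depth c) (buf ++ [c]) segs
  termination_by cs.length
  decreasing_by all_goals (simp_all [List.length_drop]; try omega)

-- tail of Source B: the three early returns
def bpost (segs : List (List Char)) : Option (List String) × String :=
  match segs with
  | [] => (none, String.ofList bugChars)
  | _ :: _ =>
    let ret := (segs.getLast?).getD []
    let rest := segs.dropLast
    if rest.isEmpty then (none, String.ofList ret)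
    else if rest.length == 1 && rest.headD [] == voidChars then (some [], String.ofList ret)
    else (some (rest.map String.ofList), String.ofList ret)

def parse_sig_alt (sig : String) : Option (List String) × String :=
  bpost ((scanB sig.toList 0 [] []).map stripP)

-- ===== PRECONDITION & SPEC =====
def Spec_parse_sig (sig : String) (out : Option (List String) × String) : Prop := out = parse_sig_alt sig
instance (sig : String) (out : Option (List String) × String) : Decidable (Spec_parse_sig sig out) := by unfold Spec_parse_sig; infer_instance

-- ===== CLAIM (what is proved, stated in full; the proofs are below) =====
def Claim_equal_parse_sig : Prop := ∀ (sig : String), Dom_parse_sig sig → Spec_parse_sig sig (parse_sig sig)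

-- ===== LEMMAS AND PROOFS =====

-- proof-side model of Python's str.split(" -> "): greedy leftmost, structural recursion
def mySplit (l : List Char) : List (List Char) :=
  match l with
  | [] => [[]]
  | c :: rest =>
    if sepL.isPrefixOf (c :: rest) then [] :: mySplit ((c :: rest).drop 4)
    else (mySplit rest).modifyHead (c :: ·)
  termination_by l.length
  decreasing_by all_goals (simp_all [List.length_drop]; try omega)

def delta (t : List Char) : Int := t.foldl step 0

-- common form of both sides' grouping loop: chunks + depth + joined buffer
def gfold (ts : List (List Char)) (pars : Int) (buf : List Char)
    (params : List (List Char)) : List (List Char) :=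
  match ts with
  | [] => params
  | t :: ts =>
    let pars' := pars + delta t
    if pars' == 0 then gfold ts 0 [] (params ++ [stripP (buf ++ t)])
    else gfold ts pars' (buf ++ t ++ sepL) params

def joinish (cur : List (List Char)) : List Char :=
  if cur = [] then [] else PySem.Chars.join sepL cur ++ sepL

lemma step_shift (p : Int) (c : Char) : step p c = p + step 0 c := by
  simp only [step]; split_ifs <;> omega

lemma foldl_step_shift (t : List Char) : ∀ p : Int, t.foldl step p = p + delta t := by
  induction t with
  | nil => intro p; simp [delta]
  | cons c t ih =>
    intro p
    simp only [List.foldl_cons, delta] at *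
    rw [ih (step p c), ih (step 0 c), step_shift p c]; ring

lemma mySplit_ne_nil (l : List Char) : mySplit l ≠ [] := by
  induction l using mySplit.induct with
  | case1 => simp [mySplit]
  | case2 c rest h ih => rw [mySplit]; simp [h]
  | case3 c rest h ih =>
    rw [mySplit]; simp only [if_neg h]
    cases hm : mySplit rest with
    | nil => exact absurd hm ih
    | cons a as => simp [List.modifyHead]

lemma join_snoc (cur : List (List Char)) (t : List Char) :
    PySem.Chars.join sepL (cur ++ [t]) = joinish cur ++ t := by
  induction cur with
  | nil => simp [joinish, PySem.Chars.join, List.intercalate]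
  | cons c cs ih =>
    cases cs with
    | nil =>
      simp [joinish, PySem.Chars.join, List.intercalate, List.intersperse]
    | cons d ds =>
      have h1 : PySem.Chars.join sepL ((c :: d :: ds) ++ [t])
          = c ++ sepL ++ PySem.Chars.join sepL ((d :: ds) ++ [t]) := by
        simp [PySem.Chars.join, List.intercalate, List.intersperse]
      have h2 : PySem.Chars.join sepL (c :: d :: ds)
          = c ++ sepL ++ PySem.Chars.join sepL (d :: ds) := by
        simp [PySem.Chars.join, List.intercalate, List.intersperse]
      rw [h1, ih]
      simp [joinish, h2, List.append_assoc]

-- Chars.splitOn's fueled loop computes the structural split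
lemma go_eq_mySplit : ∀ (fuel : ℕ) (l : List Char), l.length ≤ fuel →
    ∀ (cur : List Char) (acc : List (List Char)),
    PySem.Chars.splitOn.go sepL fuel l cur acc
      = acc.reverse ++ (mySplit l).modifyHead (cur.reverse ++ ·) := by
  intro fuel
  induction fuel with
  | zero =>
    intro l hl cur acc
    have : l = [] := by cases l <;> simp_all
    subst this
    rw [PySem.Chars.splitOn.go]
    simp [mySplit]
  | succ fuel ih =>
    intro l hl cur acc
    cases l with
    | nil =>
      rw [PySem.Chars.splitOn.go]
      · simp [mySplit]
      · omega
    | cons c rest =>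
      rw [PySem.Chars.splitOn.go]
      by_cases hp : sepL.isPrefixOf (c :: rest)
      · rw [if_pos hp, ih _ (by simp [List.length_drop, sepL] at *; omega)]
        rw [mySplit, if_pos hp]
        cases hm : mySplit ((c :: rest).drop 4) with
        | nil => exact absurd hm (mySplit_ne_nil _)
        | cons a as =>
          have hm' : mySplit (List.drop 3 rest) = a :: as := by simpa using hm
          simp [sepL, hm', List.modifyHead]
      · rw [if_neg hp, ih rest (by simp at hl; omega)]
        rw [mySplit, if_neg hp]
        cases hm : mySplit rest with
        | nil => exact absurd hm (mySplit_ne_nil _)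
        | cons a as => simp [List.modifyHead]

lemma splitOn_eq_mySplit (l : List Char) :
    PySem.Chars.splitOn l sepL = mySplit l := by
  show PySem.Chars.splitOn.go sepL (l.length + 1) l [] [] = mySplit l
  rw [go_eq_mySplit (l.length + 1) l (by omega)]
  cases hm : mySplit l with
  | nil => exact absurd hm (mySplit_ne_nil _)
  | cons a as => simp

-- A's chunk fold equals gfold
lemma afold_eq_gfold : ∀ (ts : List (List Char)) (params : List (List Char)) (pars : Int)
    (cur : List (List Char)),
    (ts.foldl (fun (st : List (List Char) × Int × List (List Char)) t =>
      let currentType := st.2.2 ++ [t]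
      let pars := t.foldl step st.2.1
      if pars == 0 then
        (st.1 ++ [stripP (PySem.Chars.join sepL currentType)], pars, ([] : List (List Char)))
      else (st.1, pars, currentType)) (params, pars, cur)).1
      = gfold ts pars (joinish cur) params := by
  intro ts
  induction ts with
  | nil => intro params pars cur; simp [gfold]
  | cons t ts ih =>
    intro params pars cur
    rw [List.foldl_cons, gfold]
    rw [foldl_step_shift t pars]
    by_cases h : (pars + delta t == 0)
    · rw [if_pos h, if_pos h, ih]
      have h0 : pars + delta t = 0 := by exact_mod_cast (beq_iff_eq.mp h)
      rw [join_snoc, h0]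
      simp [joinish]
    · rw [if_neg h, if_neg h, ih]
      have hne : cur ++ [t] ≠ [] := by simp
      have : joinish (cur ++ [t]) = joinish cur ++ t ++ sepL := by
        rw [joinish, if_neg hne, join_snoc]
      rw [this]

lemma gfold_cons_head (c : Char) (t : List Char) (ts : List (List Char)) (pars : Int)
    (buf : List Char) (params : List (List Char)) :
    gfold ((c :: t) :: ts) pars buf params
      = gfold (t :: ts) (step pars c) (buf ++ [c]) params := by
  rw [gfold, gfold]
  have h : step pars c + delta t = pars + delta (c :: t) := by
    rw [step_shift]
    simp only [delta, List.foldl_cons]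
    rw [foldl_step_shift t (step 0 c)]
    unfold delta
    ring
  rw [h]
  by_cases hc : (pars + delta (c :: t) == 0)
  · rw [if_pos hc, if_pos hc]
    simp [List.append_assoc]
  · rw [if_neg hc, if_neg hc]
    simp [List.append_assoc]

-- B's scan equals gfold over the structural split
lemma scan_eq_gfold : ∀ (n : ℕ) (cs : List Char), cs.length ≤ n →
    ∀ (d : Int) (buf : List Char) (segs : List (List Char)),
    (scanB cs d buf segs).map stripP
      = gfold (mySplit cs) d buf (segs.map stripP) := by
  intro n
  induction n with
  | zero =>
    intro cs hl d buf segs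
    have : cs = [] := by cases cs <;> simp_all
    subst this
    rw [scanB, mySplit, gfold]
    have hd : delta ([] : List Char) = 0 := by simp [delta]
    rw [hd, add_zero]
    by_cases h : (d == 0)
    · rw [if_pos h, if_pos h, gfold]; simp
    · rw [if_neg h, if_neg h, gfold]
  | succ n ih =>
    intro cs hl d buf segs
    cases cs with
    | nil =>
      rw [scanB, mySplit, gfold]
      have hd : delta ([] : List Char) = 0 := by simp [delta]
      rw [hd, add_zero]
      by_cases h : (d == 0)
      · rw [if_pos h, if_pos h, gfold]; simp
      · rw [if_neg h, if_neg h, gfold]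
    | cons c rest =>
      rw [scanB, mySplit]
      by_cases hp : sepL.isPrefixOf (c :: rest)
      · rw [if_pos hp, if_pos hp, gfold]
        have hd : delta ([] : List Char) = 0 := by simp [delta]
        rw [hd, add_zero]
        have hlen : ((c :: rest).drop 4).length ≤ n := by
          simp [List.length_drop] at *; omega
        by_cases h : (d == 0)
        · rw [if_pos h, if_pos h, ih _ hlen]
          have h0 : d = 0 := by exact_mod_cast (beq_iff_eq.mp h)
          subst h0
          simp
        · rw [if_neg h, if_neg h, ih _ hlen]
          simp
      · rw [if_neg hp, if_neg hp, ih rest (by simp at hl; omega)]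
        cases hm : mySplit rest with
        | nil => exact absurd hm (mySplit_ne_nil _)
        | cons a as =>
          rw [List.modifyHead_cons, gfold_cons_head]

lemma apost_eq_bpost (ps : List (List Char)) : apost ps = bpost ps := by
  cases hps : ps with
  | nil => simp [apost, bpost]
  | cons a as => simp [apost, bpost, List.isEmpty_iff]

-- ===== VERDICT (by name: the statement is the Claim_ definition above) =====
theorem parse_sig_spec : Claim_equal_parse_sig := by
  intro sig _
  show parse_sig sig = parse_sig_alt sig
  unfold parse_sig parse_sig_alt
  rw [splitOn_eq_mySplit]
  show apost _ = bpost _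
  rw [afold_eq_gfold,
      scan_eq_gfold sig.toList.length sig.toList le_rfl 0 [] []]
  simp [joinish, apost_eq_bpost]
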